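-- pv_equiv track=rewrite | github.com/DenisMaksakov/ya_algorithm_training | 2021_1/1_complexity_testing_edge_cases/E_code.py | get_possible_flats_per_floor
-- ===== SOURCE A (Python) =====
-- from typing import List, Tuple, Optional, Set
--
-- def get_possible_flats_per_floor(K2: int, P2: int, N2: int, M: int) -> List[int]:
--     """
--     Определение возможных значений квартир на этаже (Xi),
--     удовлетворяющих заданным условиям.
--
--     Args:
--         K2: номер известной квартиры
--         P2: известный подъезд
--         N2: известный этаж
--         M: количество этажей в доме
--
--     Returns:
--         Список возможных значений квартир на этаже
--     """
--     if N2 > M: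
--         return []
--
--     # Вычисляем порядковый номер квартиры в доме от начала
--     # (P2 - 1) * M + N2 - это порядковый номер этажа от начала дома
--     # Умножаем на Xi - получаем общее количество квартир до этой
--     target_floor_position = (P2 - 1) * M + N2
--
--     possible_xi_values = []
--     max_value = max(K2, 10 ** 6)  # Берем максимальное возможное значение
--
--     for xi in range(1, max_value + 1):
--         # Проверяем, на каком этаже будет квартира K2 при данном xi
--         # ceil(K2 / xi) - порядковый номер этажа от начала дома
--         calculated_floor = (K2 + xi - 1) // xi
--
--         if calculated_floor == target_floor_position:
--             possible_xi_values.append(xi)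
--
--     return possible_xi_values
-- ===== SOURCE B (Python) =====
-- def _solve_ge(a, b, hi):
--     """Positive solutions of a*x >= b within [1, hi], as an interval (lo, up)."""
--     if a > 0:
--         return -(-b // a), hi          # x >= ceil(b/a)
--     if a == 0:
--         return (1, hi) if b <= 0 else (1, 0)
--     return 1, min(hi, b // a)          # x <= floor(b/a)
--
--
-- def get_possible_flats_per_floor(K2, P2, N2, M):
--     # xi qualifies iff ceil(K2/xi) == t, i.e. K2 <= t*xi and (1-t)*xi >= 1-K2:
--     # intersect the solution intervals of the two linear inequalities.
--     if N2 > M: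
--         return []
--     t = (P2 - 1) * M + N2
--     hi = max(K2, 10 ** 6)
--     lo1, up1 = _solve_ge(t, K2, hi)
--     lo2, up2 = _solve_ge(1 - t, 1 - K2, hi)
--     return list(range(max(1, lo1, lo2), min(up1, up2) + 1))
-- ===== Notes on version B (the rewrite author's own statement) =====
-- stated objective: alternative
-- what changed: Instead of scanning every candidate xi from 1 to max(K2,10^6) and testing ceil(K2/xi)==target, B intersects the solution intervals of the two linear inequalities t*xi >= K2 and (1-t)*xi >= 1-K2 (one generic positive-solution helper applied twice) and emits the resulting range directly; per-call work besides materialising the output list drops from O(max(K2,10^6)) to O(1), but on inputs whose output range is itself ~10^6 long both are dominated by building it, so the measured speedup varies by input.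
import Mathlib
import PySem

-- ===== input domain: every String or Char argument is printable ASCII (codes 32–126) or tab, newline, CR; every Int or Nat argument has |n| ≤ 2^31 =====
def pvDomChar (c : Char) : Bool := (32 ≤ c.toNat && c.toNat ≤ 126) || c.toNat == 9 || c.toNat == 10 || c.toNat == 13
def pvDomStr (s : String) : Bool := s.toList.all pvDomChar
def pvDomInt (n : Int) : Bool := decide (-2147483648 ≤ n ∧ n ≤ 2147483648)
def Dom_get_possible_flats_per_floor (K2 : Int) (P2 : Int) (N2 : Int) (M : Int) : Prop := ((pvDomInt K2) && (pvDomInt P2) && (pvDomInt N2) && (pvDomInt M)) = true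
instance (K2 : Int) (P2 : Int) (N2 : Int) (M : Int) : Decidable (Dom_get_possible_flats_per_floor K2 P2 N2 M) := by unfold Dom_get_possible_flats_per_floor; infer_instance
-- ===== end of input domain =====

-- B replaces A's scan of every candidate xi by intersecting the solution intervals of the two
-- linear inequalities t*xi >= K2 and (1-t)*xi >= 1-K2 (one generic helper applied twice);
-- an alternative algorithm doing O(1) work besides emitting the output range.

-- ===== PORT A =====
-- A's 'for xi in range(1, max_value + 1)' loop: n iterations left, current xi, accumulator
def pvALoop (K2 t : Int) : Nat → Int → List Int → List Int
  | 0, _, acc => acc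
  | n + 1, xi, acc =>
    pvALoop K2 t n (xi + 1)
      (if PySem.Int.floordiv (K2 + xi - 1) xi = t then acc ++ [xi] else acc)

def get_possible_flats_per_floor (K2 : Int) (P2 : Int) (N2 : Int) (M : Int) : List Int :=
  if N2 > M then []
  else
    let target_floor_position := (P2 - 1) * M + N2
    let max_value := max K2 (1000000 : Int)
    pvALoop K2 target_floor_position ((max_value + 1) - 1).toNat 1 []

-- ===== PORT B =====
-- Source B's _solve_ge: positive solutions of a*x >= b within [1, hi], as an interval
def pvSolveGe (a b hi : Int) : Int × Int :=
  if a > 0 then (-(PySem.Int.floordiv (-b) a), hi)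
  else if a = 0 then (if b ≤ 0 then (1, hi) else (1, 0))
  else (1, min hi (PySem.Int.floordiv b a))

def get_possible_flats_per_floor_alt (K2 : Int) (P2 : Int) (N2 : Int) (M : Int) : List Int :=
  if N2 > M then []
  else
    let t := (P2 - 1) * M + N2
    let hi := max K2 (1000000 : Int)
    let p1 := pvSolveGe t K2 hi
    let p2 := pvSolveGe (1 - t) (1 - K2) hi
    PySem.List.pyRange (max (max 1 p1.1) p2.1) (min p1.2 p2.2 + 1) 1

-- ===== PRECONDITION & SPEC =====
def Spec_get_possible_flats_per_floor (K2 : Int) (P2 : Int) (N2 : Int) (M : Int) (out : List Int) : Prop := out = get_possible_flats_per_floor_alt K2 P2 N2 M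
instance (K2 : Int) (P2 : Int) (N2 : Int) (M : Int) (out : List Int) : Decidable (Spec_get_possible_flats_per_floor K2 P2 N2 M out) := by unfold Spec_get_possible_flats_per_floor; infer_instance

-- ===== CLAIM =====
def Claim_equal_get_possible_flats_per_floor : Prop := ∀ (K2 : Int) (P2 : Int) (N2 : Int) (M : Int), Dom_get_possible_flats_per_floor K2 P2 N2 M → Spec_get_possible_flats_per_floor K2 P2 N2 M (get_possible_flats_per_floor K2 P2 N2 M)

-- ===== LEMMAS AND PROOFS =====

-- filtering an integer range by an interval test yields the intersected range
theorem pv_filter_pyRange_interval (lo hi : Int) : ∀ (n : Nat) (a b : Int), b - a ≤ n →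
    (PySem.List.pyRange a b 1).filter (fun x => decide (lo ≤ x ∧ x ≤ hi))
      = PySem.List.pyRange (max a lo) (min b (hi + 1)) 1 := by
  intro n
  induction n with
  | zero =>
    intro a b h
    rw [PySem.List.pyRange_one_eq_nil (by omega), PySem.List.pyRange_one_eq_nil (by omega)]
    rfl
  | succ n ih =>
    intro a b h
    by_cases hab : b ≤ a
    · rw [PySem.List.pyRange_one_eq_nil hab, PySem.List.pyRange_one_eq_nil (by omega)]
      rfl
    · push Not at hab
      rw [PySem.List.pyRange_one_cons hab, List.filter_cons]
      by_cases hp : lo ≤ a ∧ a ≤ hi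
      · have hd : decide (lo ≤ a ∧ a ≤ hi) = true := by simpa using hp
        rw [hd]
        simp only [if_true]
        rw [ih (a + 1) b (by omega)]
        rw [PySem.List.pyRange_one_cons (show max a lo < min b (hi + 1) by omega)]
        have e1 : max a lo = a := by omega
        have e2 : max (a + 1) lo = a + 1 := by omega
        rw [e1, e2]
      · have hd : decide (lo ≤ a ∧ a ≤ hi) = false := by simpa using hp
        rw [hd]
        simp only [Bool.false_eq_true, if_false]
        rw [ih (a + 1) b (by omega)]
        rcases not_and_or.mp hp with hlo | hhi
        · have : max (a + 1) lo = max a lo := by omega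
          rw [this]
        · rw [PySem.List.pyRange_one_eq_nil (by omega),
            PySem.List.pyRange_one_eq_nil (by omega)]

-- A's per-candidate test, as the conjunction of two linear inequalities in xi
theorem pv_cond_iff (K2 t xi : Int) (hx : 1 ≤ xi) :
    PySem.Int.floordiv (K2 + xi - 1) xi = t ↔ (t - 1) * xi < K2 ∧ K2 ≤ t * xi := by
  rw [PySem.Int.floordiv_eq_iff_of_pos (by omega)]
  constructor
  · rintro ⟨h1, h2⟩; constructor <;> nlinarith
  · rintro ⟨h1, h2⟩; constructor <;> nlinarith

-- b ≤ a*xi for a > 0 is a ceiling lower bound on xi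
theorem pv_le_iff_ceil (b a xi : Int) (ha : 0 < a) :
    b ≤ a * xi ↔ -(PySem.Int.floordiv (-b) a) ≤ xi := by
  have := PySem.Int.le_floordiv_iff_mul_le (a := -b) (b := a) (q := -xi) ha
  constructor
  · intro h
    have : -xi ≤ PySem.Int.floordiv (-b) a := this.mpr (by nlinarith)
    omega
  · intro h
    have : -xi * a ≤ -b := this.mp (by omega)
    nlinarith

-- b ≤ a*xi for a < 0 is a floor upper bound on xi
theorem pv_le_iff_floor_neg (b a xi : Int) (ha : a < 0) :
    b ≤ a * xi ↔ xi ≤ PySem.Int.floordiv b a := by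
  have hrw : PySem.Int.floordiv b a = PySem.Int.floordiv (-b) (-a) := by
    have h := PySem.Int.floordiv_neg_neg (-b) (-a)
    simp only [neg_neg] at h
    exact h
  rw [hrw, PySem.Int.le_floordiv_iff_mul_le (show (0:Int) < -a by omega)]
  constructor <;> intro h <;> nlinarith

-- the helper's interval characterises its inequality on [1, hi]
theorem pvSolveGe_spec (a b hi xi : Int) (h1 : 1 ≤ xi) (h2 : xi ≤ hi) :
    b ≤ a * xi ↔ (pvSolveGe a b hi).1 ≤ xi ∧ xi ≤ (pvSolveGe a b hi).2 := by
  unfold pvSolveGe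
  by_cases ha : a > 0
  · simp only [if_pos ha]
    rw [pv_le_iff_ceil b a xi ha]
    constructor
    · exact fun h => ⟨h, h2⟩
    · exact fun h => h.1
  · by_cases ha0 : a = 0
    · subst ha0
      by_cases hb : b ≤ 0
      · simp [hb]
        omega
      · simp [hb]
        omega
    · have han : a < 0 := by omega
      simp only [if_neg ha, if_neg ha0]
      rw [pv_le_iff_floor_neg b a xi han]
      constructor
      · intro h; exact ⟨h1, by omega⟩
      · intro h; omega

-- the helper's upper endpoint never exceeds hi (for 0 ≤ hi)
theorem pvSolveGe_snd_le (a b hi : Int) (hh : 0 ≤ hi) : (pvSolveGe a b hi).2 ≤ hi := by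
  unfold pvSolveGe
  by_cases ha : a > 0
  · simp [ha]
  · by_cases ha0 : a = 0
    · by_cases hb : b ≤ 0 <;> simp [ha0, hb]; omega
    · simp only [if_neg ha, if_neg ha0]
      omega

-- the filtered scan over [1, maxv] equals the clipped range
theorem pv_scan_eq (K2 t maxv lo hi : Int)
    (hiff : ∀ xi : Int, 1 ≤ xi → xi ≤ maxv →
      (PySem.Int.floordiv (K2 + xi - 1) xi = t ↔ lo ≤ xi ∧ xi ≤ hi)) :
    (PySem.List.pyRange 1 (maxv + 1) 1).foldl
      (fun acc xi => if PySem.Int.floordiv (K2 + xi - 1) xi = t then acc ++ [xi] else acc) []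
      = PySem.List.pyRange (max 1 lo) (min (maxv + 1) (hi + 1)) 1 := by
  rw [PySem.List.foldl_append_ite_eq_filter]
  rw [List.filter_congr (q := fun x => decide (lo ≤ x ∧ x ≤ hi))
    (by
      intro x hx
      have hm := PySem.List.mem_pyRange_one.mp hx
      simp [hiff x hm.1 (by omega)])]
  rw [pv_filter_pyRange_interval lo hi (maxv + 1 - 1).toNat 1 (maxv + 1) (by omega)]
  simp

-- the explicit loop is the foldl of its iteration space
theorem pvALoop_eq_foldl (K2 t : Int) : ∀ (n : Nat) (xi : Int) (acc : List Int),
    pvALoop K2 t n xi acc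
      = (PySem.List.pyRange xi (xi + n) 1).foldl
          (fun acc x => if PySem.Int.floordiv (K2 + x - 1) x = t then acc ++ [x] else acc) acc := by
  intro n
  induction n with
  | zero =>
    intro xi acc
    rw [PySem.List.pyRange_one_eq_nil (by omega)]
    rfl
  | succ n ih =>
    intro xi acc
    rw [PySem.List.pyRange_one_cons (show xi < xi + (n + 1 : Nat) by push_cast; omega)]
    simp only [List.foldl_cons, pvALoop, ih (xi + 1)]
    congr 2
    · push_cast; ring

theorem get_possible_flats_per_floor_eq (K2 P2 N2 M : Int) :
    get_possible_flats_per_floor K2 P2 N2 M = get_possible_flats_per_floor_alt K2 P2 N2 M := by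
  unfold get_possible_flats_per_floor get_possible_flats_per_floor_alt
  by_cases hNM : N2 > M
  · simp [hNM]
  · simp only [if_neg hNM]
    set t := (P2 - 1) * M + N2 with ht
    set maxv := max K2 (1000000 : Int) with hmax
    have hmax1 : 1 ≤ maxv := by omega
    rw [pvALoop_eq_foldl, show (1 : Int) + ((maxv + 1 - 1).toNat : Int) = maxv + 1 by omega]
    set p1 := pvSolveGe t K2 maxv with hp1
    set p2 := pvSolveGe (1 - t) (1 - K2) maxv with hp2
    rw [pv_scan_eq K2 t maxv (max p1.1 p2.1) (min p1.2 p2.2) (by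
      intro xi hx hxm
      rw [pv_cond_iff K2 t xi hx]
      have e1 := pvSolveGe_spec t K2 maxv xi hx hxm
      have e2 := pvSolveGe_spec (1 - t) (1 - K2) maxv xi hx hxm
      rw [← hp1] at e1
      rw [← hp2] at e2
      constructor
      · rintro ⟨hlt, hle⟩
        have h2 : 1 - K2 ≤ (1 - t) * xi := by nlinarith
        have := e1.mp hle
        have := e2.mp h2
        omega
      · rintro ⟨hlo, hhi⟩
        have hle := e1.mpr ⟨by omega, by omega⟩
        have h2 := e2.mpr ⟨by omega, by omega⟩
        exact ⟨by nlinarith, hle⟩)]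
    have hb1 := pvSolveGe_snd_le t K2 maxv (by omega)
    have hb2 := pvSolveGe_snd_le (1 - t) (1 - K2) maxv (by omega)
    rw [← hp1] at hb1
    rw [← hp2] at hb2
    congr 1
    · omega
    · omega

-- ===== VERDICT =====
theorem get_possible_flats_per_floor_spec : Claim_equal_get_possible_flats_per_floor := by
  intro K2 P2 N2 M _
  unfold Spec_get_possible_flats_per_floor
  exact get_possible_flats_per_floor_eq K2 P2 N2 M
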